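-- pv_equiv track=rewrite | github.com/Aurelshere/VigenereXOR | VigenereXOR.py | vigenere_decrypt_bits
-- ===== SOURCE A (Python) =====
-- def generate_key_bits(message, key):
--     key_bits = ''.join(format(ord(k), '08b') for k in key)
--     if len(message) == len(key_bits):
--         return key_bits
--     elif len(message) < len(key_bits):
--         return key_bits[:len(message)]
--     else:
--         key_bits = key_bits * (len(message) // len(key_bits)) + key_bits[:len(message) % len(key_bits)]
--         return key_bits
--
-- def vigenere_decrypt_bits(ciphertext_bits, key):
--     result = ""
--     key_bits = generate_key_bits(ciphertext_bits, key.upper())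
--
--     for i in range(0, len(ciphertext_bits), 8):
--         if ciphertext_bits[i:i+8] == ' ':
--             result += ' '
--         else:
--             char = chr(int(ciphertext_bits[i:i+8], 2) ^ int(key_bits[i:i+8], 2))
--             result += char
--
--     return result
--
-- message = "FRIDASUKMA"
--
-- key = "NUSANTARA"
-- ===== SOURCE B (Python) =====
-- def vigenere_decrypt_bits(ciphertext_bits, key):
--     # Bit-stream XOR: each plaintext bit is (ciphertext bit != cyclically-indexed key bit),
--     # accumulated per chunk with a Horner loop -- no int() parsing, no repeated key string.
--     base = ''.join(format(ord(c), '08b') for c in key.upper())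
--     out = []
--     for i in range(0, len(ciphertext_bits), 8):
--         chunk = ciphertext_bits[i:i+8]
--         if chunk == ' ':
--             out.append(' ')
--         else:
--             code = 0
--             for j, bit in enumerate(chunk):
--                 code = 2 * code + ('01'.index(bit) ^ '01'.index(base[(i + j) % len(base)]))
--             out.append(chr(code))
--     return ''.join(out)
-- ===== Notes on version B (the rewrite author's own statement) =====
-- stated objective: alternative
-- what changed: B replaces per-chunk int(...,2) parsing and integer XOR of a materialised repeated key string by a bit-stream algorithm: each ciphertext bit is looked up with '01'.index, XORed with the cyclically-indexed base key bit, and the character is rebuilt with a Horner accumulator (2*code + bit); the repeated key string is never built.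
-- outside the precondition, e.g. on vigenere_decrypt_bits('1_000001', 'K'): A returns '\n', B raises ValueError; on vigenere_decrypt_bits(' 1', 'K'): A returns '\x00', B raises ValueError
import Mathlib
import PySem

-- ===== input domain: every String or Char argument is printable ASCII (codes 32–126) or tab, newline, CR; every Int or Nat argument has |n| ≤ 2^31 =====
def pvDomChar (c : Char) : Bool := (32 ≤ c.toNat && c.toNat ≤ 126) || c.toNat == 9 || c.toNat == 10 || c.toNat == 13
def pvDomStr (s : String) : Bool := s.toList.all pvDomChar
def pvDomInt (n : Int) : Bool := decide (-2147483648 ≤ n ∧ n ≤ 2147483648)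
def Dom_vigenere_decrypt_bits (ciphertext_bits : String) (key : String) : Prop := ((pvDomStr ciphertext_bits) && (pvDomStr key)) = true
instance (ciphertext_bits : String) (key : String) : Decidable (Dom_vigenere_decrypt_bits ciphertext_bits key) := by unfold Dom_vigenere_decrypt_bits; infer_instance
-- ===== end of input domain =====

-- B decrypts at the bit level (ciphertext bit ≠ cyclic key bit, Horner accumulator) instead of
-- int(...,2)-parsing chunks of a materialised repeated key string (return value only; no side effects).

-- ===== PORT A =====
-- format(ord(k), '08b'): binary digits of ord(k) left-padded with '0' to width 8; ord(k) ≥ 0 always, so zfill is exact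
def pvBlock (c : Char) : List Char :=
  PySem.Chars.zfill (PySem.Int.toBinChars (c.toNat : Int)) 8

def pvGenerateKeyBits (message : List Char) (key : List Char) : List Char :=
  let key_bits := (key.map pvBlock).flatten
  if (message.length : Int) = (key_bits.length : Int) then key_bits
  else if (message.length : Int) < (key_bits.length : Int) then
    PySem.List.slice key_bits none (some (message.length : Int))
  else
    -- key_bits * (len // L) + key_bits[: len % L]; '//' and '%' raise on L = 0 (excluded by Pre_), ported via floordiv?/mod?
    PySem.List.pyRepeat key_bits ((PySem.Int.floordiv? (message.length : Int) (key_bits.length : Int)).getD 0)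
      ++ PySem.List.slice key_bits none (some ((PySem.Int.mod? (message.length : Int) (key_bits.length : Int)).getD 0))

-- chr(x) ported as Char.ofNat x.toNat: exact for 0 ≤ x ≤ 255, which Pre_ guarantees; int(s, 2) via ofCharsBase?
def vigenere_decrypt_bits (ciphertext_bits : String) (key : String) : String :=
  let cb := ciphertext_bits.toList
  let key_bits := pvGenerateKeyBits cb (PySem.Chars.upper key.toList)
  let res := (PySem.List.pyRange 0 (cb.length : Int) 8).foldl (fun acc i =>
    let chunk := PySem.List.slice cb (some i) (some (i + 8))
    if chunk = [' '] then acc ++ [' ']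
    else
      acc ++ [Char.ofNat (PySem.Int.bxor
        ((PySem.Int.ofCharsBase? chunk 2).getD 0)
        ((PySem.Int.ofCharsBase? (PySem.List.slice key_bits (some i) (some (i + 8))) 2).getD 0)).toNat]) ([] : List Char)
  String.ofList res

-- ===== PORT B =====
-- base[(i+j) % len(base)]: '%' raises on len(base) = 0 (excluded by Pre_), ported via mod?;
-- the in-range index read is pyGetD; '01'.index(c) is PySem.List.index? ['0','1'] c, whose
-- none case (ValueError on a non-bit character) is excluded by Pre_, ported via getD 0
def vigenere_decrypt_bits_alt (ciphertext_bits : String) (key : String) : String :=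
  let cb := ciphertext_bits.toList
  let base := ((PySem.Chars.upper key.toList).map pvBlock).flatten
  let res := (PySem.List.pyRange 0 (cb.length : Int) 8).foldl (fun acc i =>
    let chunk := PySem.List.slice cb (some i) (some (i + 8))
    if chunk = [' '] then acc ++ [' ']
    else
      let code := (PySem.List.enumerate chunk).foldl (fun code jb =>
        2 * code + PySem.Int.bxor (((PySem.List.index? ['0', '1'] jb.2).getD 0 : Nat) : Int)
          (((PySem.List.index? ['0', '1']
            (PySem.List.pyGetD base ((PySem.Int.mod? (i + jb.1) (base.length : Int)).getD 0) ' ')).getD 0 : Nat) : Int)) (0 : Int)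
      acc ++ [Char.ofNat code.toNat]) ([] : List Char)
  String.ofList res

-- ===== PRECONDITION & SPEC =====
def pvIsBin (c : Char) : Bool := c = '0' || c = '1'

-- Pre_ keeps the natural bit-string domain: every 8-chunk is either the space chunk A special-cases
-- or consists of '0'/'1' only, and the key is non-empty unless the ciphertext is empty. This excludes
-- inputs A still returns on whose chunks carry int()-accepted extras (whitespace, '_', '+'), which lie
-- outside the natural domain of a bit-string decryptor; it also excludes all inputs where A raises
-- (ZeroDivisionError on an empty key, ValueError in int() or chr()).
def Pre_vigenere_decrypt_bits (ciphertext_bits : String) (key : String) : Prop :=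
  (ciphertext_bits.toList = [] ∨ key.toList ≠ []) ∧
  ∀ i ∈ PySem.List.pyRange 0 (ciphertext_bits.toList.length : Int) 8,
    PySem.List.slice ciphertext_bits.toList (some i) (some (i + 8)) = [' '] ∨
    (PySem.List.slice ciphertext_bits.toList (some i) (some (i + 8))).all pvIsBin = true
instance (ciphertext_bits : String) (key : String) : Decidable (Pre_vigenere_decrypt_bits ciphertext_bits key) := by
  unfold Pre_vigenere_decrypt_bits; infer_instance

def pvWitness_vigenere_decrypt_bits : String × String := ("0100000101000010", "Key")

def Spec_vigenere_decrypt_bits (ciphertext_bits : String) (key : String) (out : String) : Prop := out = vigenere_decrypt_bits_alt ciphertext_bits key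
instance (ciphertext_bits : String) (key : String) (out : String) : Decidable (Spec_vigenere_decrypt_bits ciphertext_bits key out) := by unfold Spec_vigenere_decrypt_bits; infer_instance

-- ===== CLAIM (what is proved, stated in full; the proofs are below) =====
def Claim_equal_vigenere_decrypt_bits : Prop := ∀ (ciphertext_bits : String) (key : String), Dom_vigenere_decrypt_bits ciphertext_bits key → Pre_vigenere_decrypt_bits ciphertext_bits key → Spec_vigenere_decrypt_bits ciphertext_bits key (vigenere_decrypt_bits ciphertext_bits key)
-- ===== LEMMAS AND PROOFS =====

-- the base key-bit string is non-empty for a non-empty key (each block has width 8)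
lemma pv_base_len_pos (key : List Char) (h : key ≠ []) :
    0 < ((key.map pvBlock).flatten).length := by
  obtain ⟨c, rest, rfl⟩ := List.exists_cons_of_ne_nil h
  simp [pvBlock, PySem.Chars.length_zfill]

-- cyclic reading of repeat-then-truncate
lemma pv_rep_getD (xs : List Char) (q r k : Nat)
    (hr : r ≤ xs.length) (hk : k < q * xs.length + r) :
    ((List.replicate q xs).flatten ++ xs.take r).getD k ' ' = xs.getD (k % xs.length) ' ' := by
  induction q generalizing k with
  | zero =>
    simp only [List.replicate, List.flatten_nil, List.nil_append]
    rw [Nat.mod_eq_of_lt (by omega)]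
    rw [List.getD_eq_getElem?_getD, List.getD_eq_getElem?_getD, List.getElem?_take_of_lt (by omega)]
  | succ q ih =>
    rw [Nat.succ_mul] at hk
    rw [List.replicate_succ, List.flatten_cons, List.append_assoc]
    by_cases hkL : k < xs.length
    · rw [Nat.mod_eq_of_lt hkL, List.getD_eq_getElem?_getD, List.getElem?_append_left hkL,
        ← List.getD_eq_getElem?_getD]
    · replace hkL := Nat.le_of_not_lt hkL
      rw [List.getD_eq_getElem?_getD, List.getElem?_append_right hkL, ← List.getD_eq_getElem?_getD,
        ih (k - xs.length) (by omega), Nat.mod_eq_sub_mod hkL]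

-- A's generated key bits are repeat-then-truncate of the base key bits
lemma pv_kb_eq (msg key : List Char) (hL : 0 < ((key.map pvBlock).flatten).length) :
    pvGenerateKeyBits msg key =
      (List.replicate (msg.length / ((key.map pvBlock).flatten).length) ((key.map pvBlock).flatten)).flatten
        ++ ((key.map pvBlock).flatten).take (msg.length % ((key.map pvBlock).flatten).length) := by
  generalize hbase : (key.map pvBlock).flatten = base at *
  unfold pvGenerateKeyBits
  rw [hbase]
  show (if (msg.length : Int) = (base.length : Int) then base
    else if (msg.length : Int) < (base.length : Int) then PySem.List.slice base none (some (msg.length : Int))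
    else PySem.List.pyRepeat base ((PySem.Int.floordiv? (msg.length : Int) (base.length : Int)).getD 0)
      ++ PySem.List.slice base none (some ((PySem.Int.mod? (msg.length : Int) (base.length : Int)).getD 0))) = _
  split_ifs with h1 h2
  · have h : msg.length = base.length := by exact_mod_cast h1
    rw [h, Nat.div_self hL, Nat.mod_self]
    simp
  · have h : msg.length < base.length := by exact_mod_cast h2
    rw [Nat.div_eq_of_lt h, Nat.mod_eq_of_lt h, PySem.List.slice_to_natCast]
    simp
  · have hL0 : (base.length : Int) ≠ 0 := by exact_mod_cast hL.ne'
    have hd : ((msg.length : Int).fdiv (base.length : Int)) = ((msg.length / base.length : Nat) : Int) := by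
      rw [Int.fdiv_eq_ediv]
      push_cast
      simp
    have hm : ((msg.length : Int).fmod (base.length : Int)) = ((msg.length % base.length : Nat) : Int) := by
      rw [Int.fmod_eq_emod]
      push_cast
      simp
    simp only [PySem.Int.floordiv?, PySem.Int.mod?, if_neg hL0, Option.getD_some,
      PySem.List.pyRepeat, hd, hm, PySem.List.slice_to_natCast, Int.toNat_natCast]

lemma pv_kb_length (msg key : List Char) (hL : 0 < ((key.map pvBlock).flatten).length) :
    (pvGenerateKeyBits msg key).length = msg.length := by
  rw [pv_kb_eq msg key hL]
  generalize hbase : (key.map pvBlock).flatten = base at *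
  simp only [List.length_append, List.length_flatten, List.map_replicate, List.sum_replicate,
    smul_eq_mul, List.length_take]
  have h1 := Nat.div_add_mod msg.length base.length
  have h2 : base.length * (msg.length / base.length) = msg.length / base.length * base.length :=
    Nat.mul_comm _ _
  have h3 := Nat.mod_lt msg.length hL
  omega

lemma pv_kb_getD (msg key : List Char) (hL : 0 < ((key.map pvBlock).flatten).length)
    (k : Nat) (hk : k < msg.length) :
    (pvGenerateKeyBits msg key).getD k ' ' =
      ((key.map pvBlock).flatten).getD (k % ((key.map pvBlock).flatten).length) ' ' := by
  rw [pv_kb_eq msg key hL]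
  generalize hbase : (key.map pvBlock).flatten = base at *
  apply pv_rep_getD
  · exact (Nat.mod_lt msg.length hL).le
  · have h1 := Nat.div_add_mod msg.length base.length
    have h2 : base.length * (msg.length / base.length) = msg.length / base.length * base.length :=
      Nat.mul_comm _ _
    omega

-- ---- B-side value lemmas: binary strings, int(.,2) and bitwise XOR ----

-- all binary strings of length n
def pvBinLists : Nat → List (List Char)
  | 0 => [[]]
  | n+1 => (pvBinLists n).flatMap (fun l => ['0' :: l, '1' :: l])

-- the Horner value of a binary string (left-to-right)
def pvBValN (cs : List Char) : Nat := cs.foldl (fun a c => 2 * a + (if c = '1' then 1 else 0)) 0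

lemma pv_mem_binLists : ∀ (cs : List Char), cs.all pvIsBin = true → cs ∈ pvBinLists cs.length
  | [], _ => by simp [pvBinLists]
  | c :: t, h => by
    simp only [List.all_cons, Bool.and_eq_true] at h
    have ht := pv_mem_binLists t h.2
    have hc : c = '0' ∨ c = '1' := by
      rcases h with ⟨h1, -⟩
      simp [pvIsBin] at h1
      tauto
    simp only [List.length_cons, pvBinLists, List.mem_flatMap]
    exact ⟨t, ht, by rcases hc with rfl | rfl <;> simp⟩

set_option maxRecDepth 40000 in
set_option maxHeartbeats 4000000 in
lemma pv_binval_table :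
    (((List.range 8).flatMap (fun n => pvBinLists (n+1))).all
      (fun cs => PySem.Int.ofCharsBase? cs 2 == some ((pvBValN cs : Nat) : Int))) = true := by
  decide

-- int(cs, 2) on a nonempty pure-binary string of length ≤ 8 is its Horner value
lemma pv_bin_val (cs : List Char) (h0 : cs ≠ []) (h8 : cs.length ≤ 8)
    (hb : cs.all pvIsBin = true) :
    PySem.Int.ofCharsBase? cs 2 = some ((pvBValN cs : Nat) : Int) := by
  have hlen : 1 ≤ cs.length := List.length_pos_iff.mpr h0
  have hm : cs ∈ (List.range 8).flatMap (fun n => pvBinLists (n+1)) := by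
    refine List.mem_flatMap.mpr ⟨cs.length - 1, List.mem_range.mpr (by omega), ?_⟩
    have : cs.length - 1 + 1 = cs.length := by omega
    rw [this]
    exact pv_mem_binLists cs hb
  have := List.all_eq_true.mp pv_binval_table cs hm
  exact eq_of_beq this

-- one xor bit step: (2a+u) ^^^ (2b+v) = 2(a^^^b) + (u≠v)
lemma pv_xor_step (a b : Nat) (u v : Bool) :
    (2 * a + u.toNat) ^^^ (2 * b + v.toNat) = 2 * (a ^^^ b) + (bne u v).toNat := by
  have h := Nat.xor_bit u a v b
  cases u <;> cases v <;> simpa [Nat.bit] using h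

lemma pv_bval_append (xs : List Char) (c : Char) :
    pvBValN (xs ++ [c]) = 2 * pvBValN xs + (if c = '1' then 1 else 0) := by
  simp [pvBValN, List.foldl_append]

-- xor of the two Horner values is the Horner value of the bit-difference stream
lemma pv_zip_xor (ps : List (Char × Char))
    (hb : ∀ p ∈ ps, pvIsBin p.1 = true ∧ pvIsBin p.2 = true) :
    pvBValN (ps.map Prod.fst) ^^^ pvBValN (ps.map Prod.snd)
      = ps.foldl (fun a p => 2 * a + (if p.1 ≠ p.2 then 1 else 0)) 0 := by
  induction ps using List.reverseRecOn with
  | nil => simp [pvBValN]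
  | append_singleton qs q ih =>
    have hq := hb q (by simp)
    have hqs : ∀ p ∈ qs, pvIsBin p.1 = true ∧ pvIsBin p.2 = true := fun p hp => hb p (by simp [hp])
    have h1 : q.1 = '0' ∨ q.1 = '1' := by
      have := hq.1; simp [pvIsBin] at this; tauto
    have h2 : q.2 = '0' ∨ q.2 = '1' := by
      have := hq.2; simp [pvIsBin] at this; tauto
    rw [List.map_append, List.map_append, List.foldl_append, List.foldl_cons, List.foldl_nil,
      ← ih hqs]
    simp only [List.map_cons, List.map_nil, pv_bval_append]
    rcases h1 with hq1 | hq1 <;> rcases h2 with hq2 | hq2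
    · rw [hq1, hq2]
      simpa using pv_xor_step (pvBValN (qs.map Prod.fst)) (pvBValN (qs.map Prod.snd)) false false
    · rw [hq1, hq2]
      simpa using pv_xor_step (pvBValN (qs.map Prod.fst)) (pvBValN (qs.map Prod.snd)) false true
    · rw [hq1, hq2]
      simpa using pv_xor_step (pvBValN (qs.map Prod.fst)) (pvBValN (qs.map Prod.snd)) true false
    · rw [hq1, hq2]
      simpa using pv_xor_step (pvBValN (qs.map Prod.fst)) (pvBValN (qs.map Prod.snd)) true true

lemma pv_enum_fold (g : Int → Char) (F : Char → Char → Int) :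
    ∀ (cs : List Char) (s z : Int),
      (PySem.List.enumerate cs s).foldl
          (fun a p => 2 * a + F p.2 (g p.1)) z
        = (cs.zip ((List.range cs.length).map (fun (j : Nat) => g (s + (j : Int))))).foldl
          (fun a p => 2 * a + F p.1 p.2) z
  | [], s, z => by simp [PySem.List.enumerate_nil]
  | c :: t, s, z => by
    rw [PySem.List.enumerate_cons, List.foldl_cons, pv_enum_fold g F t (s + 1)]
    simp only [List.length_cons, List.range_succ_eq_map, List.map_cons, List.map_map,
      List.zip_cons_cons, List.foldl_cons, Nat.cast_zero, add_zero]
    congr 2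
    refine List.map_congr_left (fun j _ => ?_)
    simp only [Function.comp_apply]
    congr 1
    push_cast
    ring

-- '01'.index-based xor of two bits is the bit-difference indicator
lemma pv_bxoridx (c k : Char) (hc : pvIsBin c = true) (hk : pvIsBin k = true) :
    PySem.Int.bxor (((PySem.List.index? ['0', '1'] c).getD 0 : Nat) : Int)
        (((PySem.List.index? ['0', '1'] k).getD 0 : Nat) : Int)
      = if c ≠ k then 1 else 0 := by
  have hc' : c = '0' ∨ c = '1' := by simp [pvIsBin] at hc; tauto
  have hk' : k = '0' ∨ k = '1' := by simp [pvIsBin] at hk; tauto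
  rcases hc' with rfl | rfl <;> rcases hk' with rfl | rfl <;> decide

lemma pv_fold_cast (ps : List (Char × Char)) (z : Nat) :
    ps.foldl (fun a p => 2 * a + (if p.1 ≠ p.2 then 1 else 0)) (z : Int)
      = ((ps.foldl (fun a p => 2 * a + (if p.1 ≠ p.2 then 1 else 0)) z : Nat) : Int) := by
  induction ps generalizing z with
  | nil => simp
  | cons q t ih =>
    simp only [List.foldl_cons]
    have : (2 * (z : Int) + (if q.1 ≠ q.2 then 1 else 0))
        = ((2 * z + (if q.1 ≠ q.2 then 1 else 0) : Nat) : Int) := by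
      push_cast; split_ifs <;> ring
    rw [this, ih]

-- every character of a key-bit block is '0' or '1' (codes < 127 suffice for the table)
lemma pv_block_tab : ∀ m : Fin 127,
    ((pvBlock (PySem.Chars.upperChar (Char.ofNat m.val))).all pvIsBin) = true := by
  decide

lemma pv_base_bin (key : List Char) (hk : ∀ c ∈ key, pvDomChar c = true) :
    ∀ c ∈ ((PySem.Chars.upper key).map pvBlock).flatten, pvIsBin c = true := by
  intro c hc
  rw [List.mem_flatten] at hc
  obtain ⟨l, hl, hcl⟩ := hc
  rw [List.mem_map] at hl
  obtain ⟨u, hu, rfl⟩ := hl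
  simp only [PySem.Chars.upper, List.mem_map] at hu
  obtain ⟨k0, hk0, rfl⟩ := hu
  have hlt : k0.toNat < 127 := by
    have := hk k0 hk0
    simp [pvDomChar] at this
    omega
  have htab := pv_block_tab ⟨k0.toNat, hlt⟩
  rw [show Char.ofNat k0.toNat = k0 from Char.ofNat_toNat k0] at htab
  exact List.all_eq_true.mp htab c hcl

-- ===== VERDICT (by name: the statement is the Claim_ definition above) =====

theorem vigenere_decrypt_bits_spec : Claim_equal_vigenere_decrypt_bits := by
  intro s key hDom hPre
  unfold Spec_vigenere_decrypt_bits vigenere_decrypt_bits vigenere_decrypt_bits_alt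
  by_cases hcb : s.toList = []
  · rw [hcb]
    simp [PySem.List.pyRange_of_pos]
  · have hkey : key.toList ≠ [] := by
      rcases hPre.1 with h | h
      · exact absurd h hcb
      · exact h
    have hup : PySem.Chars.upper key.toList ≠ [] := by
      simp only [PySem.Chars.upper, ne_eq, List.map_eq_nil_iff]
      exact hkey
    have hL : 0 < (((PySem.Chars.upper key.toList).map pvBlock).flatten).length :=
      pv_base_len_pos _ hup
    have hkbn : (pvGenerateKeyBits s.toList (PySem.Chars.upper key.toList)).length = s.toList.length :=
      pv_kb_length _ _ hL
    have hkdom : ∀ c ∈ key.toList, pvDomChar c = true := by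
      have hd : pvDomStr key = true := by
        unfold Dom_vigenere_decrypt_bits at hDom
        simp only [Bool.and_eq_true] at hDom
        exact hDom.2
      exact List.all_eq_true.mp hd
    set base := ((PySem.Chars.upper key.toList).map pvBlock).flatten with hbase
    set kb := pvGenerateKeyBits s.toList (PySem.Chars.upper key.toList) with hkb
    have hbb : ∀ c ∈ base, pvIsBin c = true := pv_base_bin key.toList hkdom
    refine congrArg String.ofList (PySem.List.foldl_congr_mem _ _ _ _ ?_)
    intro acc i hi
    have hi' := hi
    rw [PySem.List.mem_pyRange_iff_of_pos (by norm_num : (0:Int) < 8)] at hi'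
    obtain ⟨hi0, hin, -⟩ := hi'
    dsimp only
    by_cases hsp : PySem.List.slice s.toList (some i) (some (i + 8)) = [' ']
    · rw [if_pos hsp, if_pos hsp]
    · rw [if_neg hsp, if_neg hsp]
      have hL0 : (base.length : Int) ≠ 0 := by exact_mod_cast hL.ne'
      have h8 : ((i + 8).toNat - i.toNat) = 8 := by omega
      set chunk := PySem.List.slice s.toList (some i) (some (i + 8)) with hchunk
      set ks := (List.range chunk.length).map
          (fun (j : Nat) => PySem.List.pyGetD base
            ((PySem.Int.mod? (i + (j : Int)) (base.length : Int)).getD 0) ' ') with hks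
      have hipos : i.toNat < s.toList.length := by omega
      have hclen : chunk.length = min 8 (s.toList.length - i.toNat) := by
        rw [hchunk, PySem.List.slice_toNat _ hi0 (by omega), h8]
        simp
      have hc0 : chunk ≠ [] := List.ne_nil_of_length_pos (by omega)
      have hc8 : chunk.length ≤ 8 := by omega
      have hmod : ∀ j : Nat, (PySem.Int.mod? (i + (j : Int)) (base.length : Int)).getD 0
          = (((i.toNat + j) % base.length : Nat) : Int) := by
        intro j
        simp only [PySem.Int.mod?, if_neg hL0, Option.getD_some]
        have hij : i + (j : Int) = ((i.toNat + j : Nat) : Int) := by omega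
        rw [hij, Int.ofNat_fmod]
      have hseg : PySem.List.slice kb (some i) (some (i + 8)) = ks := by
        rw [hks, PySem.List.slice_toNat _ hi0 (by omega), h8]
        apply List.ext_getElem
        · simp [hkbn, hclen]
        · intro j hj1 hj2
          have hjm : i.toNat + j < s.toList.length := by
            simp only [List.length_take, List.length_drop, hkbn] at hj1
            omega
          simp only [List.getElem_map, List.getElem_range, List.getElem_take, List.getElem_drop,
            hmod, PySem.List.pyGetD_natCast]
          have hkd := pv_kb_getD s.toList (PySem.Chars.upper key.toList) hL (i.toNat + j) hjm
          rw [← hbase, ← hkb] at hkd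
          have hlt : i.toNat + j < kb.length := by omega
          rw [List.getD_eq_getElem kb ' ' hlt] at hkd
          exact hkd
      have hbinc : chunk.all pvIsBin = true := by
        rcases hPre.2 i hi with h | h
        · exact absurd h hsp
        · exact h
      have hks_len : ks.length = chunk.length := by simp [hks]
      have hks_bin : ks.all pvIsBin = true := by
        rw [List.all_eq_true]
        intro c hc
        rw [hks, List.mem_map] at hc
        obtain ⟨j, hj, rfl⟩ := hc
        rw [hmod j, PySem.List.pyGetD_natCast]
        have hlt2 : (i.toNat + j) % base.length < base.length := Nat.mod_lt _ hL
        rw [List.getD_eq_getElem base ' ' hlt2]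
        exact hbb _ (List.getElem_mem hlt2)
      have hA1 := pv_bin_val chunk hc0 hc8 hbinc
      have hA2 := pv_bin_val ks (by rw [← List.length_pos_iff, hks_len]; exact List.length_pos_iff.mpr hc0)
        (by rw [hks_len]; exact hc8) hks_bin
      have hB := pv_enum_fold
        (fun t => PySem.List.pyGetD base ((PySem.Int.mod? (i + t) (base.length : Int)).getD 0) ' ')
        (fun b kc => PySem.Int.bxor (((PySem.List.index? ['0', '1'] b).getD 0 : Nat) : Int)
          (((PySem.List.index? ['0', '1'] kc).getD 0 : Nat) : Int))
        chunk 0 0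
      simp only [zero_add] at hB
      have hzip : (chunk.zip ks).foldl (fun a (p : Char × Char) =>
            2 * a + PySem.Int.bxor (((PySem.List.index? ['0', '1'] p.1).getD 0 : Nat) : Int)
              (((PySem.List.index? ['0', '1'] p.2).getD 0 : Nat) : Int)) 0
          = (chunk.zip ks).foldl (fun a p => 2 * a + (if p.1 ≠ p.2 then 1 else 0)) 0 := by
        refine PySem.List.foldl_congr_mem _ _ _ _ ?_
        intro a p hp
        rw [pv_bxoridx p.1 p.2 (List.all_eq_true.mp hbinc _ (List.of_mem_zip hp).1)
          (List.all_eq_true.mp hks_bin _ (List.of_mem_zip hp).2)]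
      have hC := pv_fold_cast (chunk.zip ks) 0
      simp only [Nat.cast_zero] at hC
      have hfst : (chunk.zip ks).map Prod.fst = chunk := List.map_fst_zip (by omega)
      have hsnd : (chunk.zip ks).map Prod.snd = ks := List.map_snd_zip (by omega)
      have hxor := pv_zip_xor (chunk.zip ks) (fun p hp =>
        ⟨List.all_eq_true.mp hbinc _ (List.of_mem_zip hp).1,
         List.all_eq_true.mp hks_bin _ (List.of_mem_zip hp).2⟩)
      rw [hfst, hsnd] at hxor
      rw [hseg, hA1, hA2, Option.getD_some, Option.getD_some, hB, ← hks, hzip, hC,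
        PySem.Int.bxor_natCast, hxor]
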